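-- pv_equiv track=rewrite | github.com/DakshVR/DS-Algo | 42. Divide and Conquer algo/dac.py | numFactor
-- ===== SOURCE A (Python) =====
-- def numFactor(n):
--     if n in (0,1,2):
--         return 1
--     elif n == 3:
--         return 2
--     else:
--         subP1 = numFactor(n-1)
--         subP2 = numFactor(n-3)
--         subP3 = numFactor(n-4)
--         return subP1 + subP2 + subP3
-- ===== SOURCE B (Python) =====
-- def numFactor(n):
--     # bottom-up rolling DP over f(k) = f(k-1) + f(k-3) + f(k-4)
--     if n <= 2:
--         return 1
--     a, b, c, d = 1, 1, 1, 2  # f(0), f(1), f(2), f(3)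
--     for _ in range(4, n + 1):
--         a, b, c, d = b, c, d, d + b + a
--     return d
-- ===== Notes on version B (the rewrite author's own statement) =====
-- stated objective: alternative
-- what changed: Replaces the ternary-branching recursion with a bottom-up rolling-window dynamic program keeping only the last four values (O(n) instead of exponential recursion; a timing run could not confirm a measured speed-up because A times out on larger inputs).
import Mathlib
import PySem

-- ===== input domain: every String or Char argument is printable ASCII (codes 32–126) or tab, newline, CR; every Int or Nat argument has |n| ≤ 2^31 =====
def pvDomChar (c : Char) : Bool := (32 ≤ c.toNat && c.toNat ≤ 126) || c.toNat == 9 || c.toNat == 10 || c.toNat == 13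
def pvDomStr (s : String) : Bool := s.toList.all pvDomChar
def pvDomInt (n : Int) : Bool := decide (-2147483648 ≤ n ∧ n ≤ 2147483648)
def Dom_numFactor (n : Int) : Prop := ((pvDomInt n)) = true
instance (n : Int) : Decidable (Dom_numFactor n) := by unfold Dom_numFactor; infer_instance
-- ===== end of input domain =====

-- B replaces A's ternary-branching recursion with a bottom-up rolling-window DP (intended as faster; a timing run could not confirm it, A times out on larger inputs).

-- ===== PORT A =====
-- A recurses on n; on the admitted domain 0 ≤ n, recursion on n.toNat is the same recursion.
def numFactorNat : Nat → Int
  | 0 => 1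
  | 1 => 1
  | 2 => 1
  | 3 => 2
  | (k+4) =>
      let subP1 := numFactorNat (k+3)
      let subP2 := numFactorNat (k+1)
      let subP3 := numFactorNat k
      subP1 + subP2 + subP3

def numFactor (n : Int) : Int := numFactorNat n.toNat

-- ===== PORT B =====
-- the fold step of B's loop body
def pvStep (t : Int × Int × Int × Int) (_ : Int) : Int × Int × Int × Int :=
  (t.2.1, t.2.2.1, t.2.2.2, t.2.2.2 + t.2.1 + t.1)

def numFactor_alt (n : Int) : Int :=
  if n ≤ 2 then 1
  else
    let s := (PySem.List.pyRange 4 (n+1) 1).foldl pvStep (1, 1, 1, 2)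
    s.2.2.2

-- ===== PRECONDITION & SPEC =====
-- On negative n the Python recursion never reaches a base case, so A raises RecursionError.
def Pre_numFactor (n : Int) : Prop := 0 ≤ n
instance (n : Int) : Decidable (Pre_numFactor n) := by unfold Pre_numFactor; infer_instance
def pvWitness_numFactor : Int := 5

def Spec_numFactor (n : Int) (out : Int) : Prop := out = numFactor_alt n
instance (n : Int) (out : Int) : Decidable (Spec_numFactor n out) := by unfold Spec_numFactor; infer_instance

-- ===== CLAIM (what is proved, stated in full; the proofs are below) =====
def Claim_equal_numFactor : Prop := ∀ (n : Int), Dom_numFactor n → Pre_numFactor n → Spec_numFactor n (numFactor n)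

-- ===== LEMMAS AND PROOFS =====

-- invariant: after consuming range(4, k+4) the rolling window holds f(k..k+3)
lemma pvFold_inv (k : Nat) :
    (PySem.List.pyRange 4 ((k : Int) + 4) 1).foldl pvStep (1, 1, 1, 2) =
      (numFactorNat k, numFactorNat (k+1), numFactorNat (k+2), numFactorNat (k+3)) := by
  induction k with
  | zero =>
      rw [PySem.List.pyRange_one_eq_nil (by norm_num)]
      simp [numFactorNat]
  | succ m ih =>
      have h : ((m : Int) + 1) + 4 = ((m : Int) + 4) + 1 := by ring
      rw [Nat.cast_succ, h, PySem.List.pyRange_one_succ_right (by omega),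
        List.foldl_append, ih]
      simp only [List.foldl_cons, List.foldl_nil, pvStep]
      show _ = (numFactorNat (m+1), numFactorNat (m+2), numFactorNat (m+3), numFactorNat (m+4))
      simp [numFactorNat]

-- ===== VERDICT (by name: the statement is the Claim_ definition above) =====
theorem numFactor_spec : Claim_equal_numFactor := by
  intro n _ hpre
  unfold Spec_numFactor numFactor numFactor_alt
  by_cases h : n ≤ 2
  · rw [if_pos h]
    unfold Pre_numFactor at hpre
    interval_cases n <;> decide
  · rw [if_neg h]
    push Not at h
    obtain ⟨k, hk⟩ : ∃ k : Nat, n = (k : Int) + 3 := ⟨(n - 3).toNat, by omega⟩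
    have ht : n.toNat = k + 3 := by omega
    have h4 : n + 1 = (k : Int) + 4 := by omega
    rw [ht, h4]
    show numFactorNat (k+3) =
      ((PySem.List.pyRange 4 ((k : Int) + 4) 1).foldl pvStep (1,1,1,2)).2.2.2
    rw [pvFold_inv]
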